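-- pv_equiv track=rewrite | github.com/mhihasan/advent-of-code | puzzles/year_2023/day13/solution.py | find_reflection_line
-- ===== SOURCE A (Python) =====
-- def is_mirror(pattern, s, e):
--     while s < e:
--         if pattern[s] != pattern[e]:
--             return 0
--         s += 1
--         e -= 1
--     return s if s != e else 0
--
-- def find_reflection_line(pattern):
--     s = 0
--     e = len(pattern) - 1
--     index = None
--     while s < e:
--         mirror_index = is_mirror(pattern, s, e)
--         if mirror_index:
--             index = mirror_index
--             break
--
--         s += 1
--
--     if index is None:
--         s = 0
--         e = len(pattern) - 1
--         while s < e: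
--             mirror_index = is_mirror(pattern, s, e)
--             if mirror_index:
--                 index = mirror_index
--                 break
--
--             e -= 1
--
--     if index:
--         return index
--
--     return index
-- ===== SOURCE B (Python) =====
-- def find_reflection_line(pattern):
--     n = len(pattern)
--     for m in range((n + 1) // 2, n):
--         if pattern[2 * m - n:m] == pattern[m:][::-1]:
--             return m
--     for m in range(n // 2, 0, -1):
--         if pattern[:m] == pattern[m:2 * m][::-1]:
--             return m
--     return None
-- ===== Notes on version B (the rewrite author's own statement) =====
-- stated objective: simpler
-- what changed: A probes each candidate window by walking an index pair inward (is_mirror) from two while-loops; B iterates once over candidate midpoints and compares the two halves as slices (pattern[2*m-n:m] == pattern[m:][::-1]), skipping odd-length windows that can never match.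
import Mathlib
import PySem

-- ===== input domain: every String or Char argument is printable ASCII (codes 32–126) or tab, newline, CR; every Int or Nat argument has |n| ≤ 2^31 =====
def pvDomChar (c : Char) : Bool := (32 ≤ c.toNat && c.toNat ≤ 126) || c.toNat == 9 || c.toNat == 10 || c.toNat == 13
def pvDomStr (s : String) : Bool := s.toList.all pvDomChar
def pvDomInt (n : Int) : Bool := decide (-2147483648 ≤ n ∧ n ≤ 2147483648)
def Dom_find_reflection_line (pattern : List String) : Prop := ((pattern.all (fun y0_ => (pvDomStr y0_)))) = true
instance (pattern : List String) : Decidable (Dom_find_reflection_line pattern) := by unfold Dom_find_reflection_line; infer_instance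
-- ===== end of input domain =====

-- ===== PORT A =====
-- B differs from A: A probes each anchored window with an index-pair walk (is_mirror);
-- B scans candidate midpoints once and compares the two halves as slices (objective: simpler).
-- is_mirror(pattern, s, e): walk from both ends; Python indexing is always in range when
-- called from find_reflection_line, so pyGet? (exact) is compared on Option values.
def is_mirror (pattern : List String) (s e : Int) : Int :=
  if s < e then
    if PySem.List.pyGet? pattern s ≠ PySem.List.pyGet? pattern e then 0
    else is_mirror pattern (s + 1) (e - 1)
  else if s ≠ e then s else 0
termination_by (e - s).toNat
decreasing_by omega

-- first while loop of A: s increases, e fixed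
def find_reflection_loop1 (pattern : List String) (s e : Int) : Option Int :=
  if s < e then
    let mi := is_mirror pattern s e
    if mi ≠ 0 then some mi else find_reflection_loop1 pattern (s + 1) e
  else none
termination_by (e - s).toNat
decreasing_by omega

-- second while loop of A: s fixed, e decreases
def find_reflection_loop2 (pattern : List String) (s e : Int) : Option Int :=
  if s < e then
    let mi := is_mirror pattern s e
    if mi ≠ 0 then some mi else find_reflection_loop2 pattern s (e - 1)
  else none
termination_by (e - s).toNat
decreasing_by omega

def find_reflection_line (pattern : List String) : Option Int :=
  let e : Int := (pattern.length : Int) - 1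
  let index : Option Int :=
    match find_reflection_loop1 pattern 0 e with
    | some i => some i
    | none => find_reflection_loop2 pattern 0 e
  -- Python's trailing `if index: return index / return index` returns index either way
  -- (index is never set to a zero value, is_mirror results are truthiness-checked)
  index

-- ===== PORT B =====
-- Source B: pattern[2*m-n:m] == pattern[m:][::-1]  ([::-1] ported as List.reverse)
def suffix_check (pattern : List String) (n m : Int) : Bool :=
  PySem.List.slice pattern (some (2 * m - n)) (some m) ==
    (PySem.List.slice pattern (some m) none).reverse

-- Source B: pattern[:m] == pattern[m:2*m][::-1]
def prefix_check (pattern : List String) (m : Int) : Bool :=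
  PySem.List.slice pattern none (some m) ==
    (PySem.List.slice pattern (some m) (some (2 * m))).reverse

def find_reflection_line_alt (pattern : List String) : Option Int :=
  let n : Int := (pattern.length : Int)
  match (PySem.List.pyRange (PySem.Int.floordiv (n + 1) 2) n 1).find? (suffix_check pattern n) with
  | some m => some m
  | none => (PySem.List.pyRange (PySem.Int.floordiv n 2) 0 (-1)).find? (prefix_check pattern)

-- ===== PRECONDITION & SPEC =====
def Spec_find_reflection_line (pattern : List String) (out : Option Int) : Prop := out = find_reflection_line_alt pattern
instance (pattern : List String) (out : Option Int) : Decidable (Spec_find_reflection_line pattern out) := by unfold Spec_find_reflection_line; infer_instance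

-- ===== CLAIM (what is proved, stated in full; the proofs are below) =====
def Claim_equal_find_reflection_line : Prop := ∀ (pattern : List String), Dom_find_reflection_line pattern → Spec_find_reflection_line pattern (find_reflection_line pattern)

-- ===== LEMMAS AND PROOFS =====

lemma pyRange_neg_cons (a : Int) (h : 0 < a) :
    PySem.List.pyRange a 0 (-1) = a :: PySem.List.pyRange (a - 1) 0 (-1) := by
  norm_num [PySem.List.pyRange, if_neg (by omega : ¬ a ≤ 0)]
  rw [if_pos h]
  by_cases h4 : (1:Int) < a
  · rw [if_pos h4]
    have : a.toNat = (a.toNat - 1) + 1 := by omega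
    rw [this, List.range_succ_eq_map]
    simp only [List.map_cons, List.map_map]
    rw [List.cons_eq_cons]
    constructor
    · omega
    · rw [show a.toNat - 1 + 1 - 1 = a.toNat - 1 by omega]
      exact List.map_congr_left fun k hk => by simp; ring
  · rw [if_neg h4]
    have : a.toNat = 1 := by omega
    simp [this, List.range_succ]

lemma pyRange_neg_nil (a : Int) (h : a ≤ 0) : PySem.List.pyRange a 0 (-1) = [] := by
  simp [PySem.List.pyRange]; omega

lemma pyRange_one_nil (a b : Int) (h : b ≤ a) : PySem.List.pyRange a b 1 = [] := by
  simp [PySem.List.pyRange]; omega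

-- an even-parity window always yields 0 (the walk meets in the middle)
lemma is_mirror_even (L : List String) (s : Int) (k : Nat) :
    is_mirror L s (s + 2 * k) = 0 := by
  induction k generalizing s with
  | zero => rw [is_mirror]; simp
  | succ k ih =>
      rw [is_mirror, if_pos (by omega)]
      split_ifs with h
      · rfl
      · rw [show s + 2 * (k + 1 : Nat) - 1 = (s + 1) + 2 * k by push_cast; ring]
        exact ih (s + 1)

-- the walk over an odd window equals the halves comparison
lemma is_mirror_odd (L : List String) (s k : Nat) (h : s + 2 * k ≤ L.length) :
    is_mirror L (s : Int) ((s : Int) + 2 * (k : Int) - 1) =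
      if (L.drop s).take k = ((L.drop (s + k)).take k).reverse then ((s : Int) + (k : Int)) else 0 := by
  induction k generalizing s with
  | zero =>
      rw [is_mirror, if_neg (by push_cast; omega), if_pos (by push_cast; omega)]
      simp
  | succ k ih =>
      have hs1 : s < L.length := by omega
      have he1 : s + 2 * k + 1 < L.length := by omega
      rw [is_mirror, if_pos (show (s:Int) < (s:Int) + 2 * ((k+1 : Nat) : Int) - 1 by push_cast; omega)]
      rw [show ((s:Int) + 2 * ((k+1 : Nat) : Int) - 1) = ((s + 2*k+1 : Nat) : Int) from by push_cast; ring]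
      rw [PySem.List.pyGet?_natCast, PySem.List.pyGet?_natCast,
          List.getElem?_eq_getElem hs1, List.getElem?_eq_getElem he1]
      have hL : (L.drop s).take (k+1) = L[s] :: (L.drop (s+1)).take k := by
        rw [List.drop_eq_getElem_cons hs1, List.take_succ_cons]
      have hgd : (L.drop (s+(k+1)))[k]? = some (L[s + 2*k+1]'he1) := by
        rw [List.getElem?_drop, show s+(k+1)+k = s+2*k+1 from by omega,
            List.getElem?_eq_getElem he1]
      have hR : (L.drop (s+(k+1))).take (k+1) = (L.drop (s+(k+1))).take k ++ [L[s + 2*k+1]'he1] := by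
        rw [List.take_add_one, hgd]; rfl
      by_cases hEq : L[s] = L[s + 2*k+1]'he1
      · rw [if_neg (by simp [hEq])]
        rw [show ((s:Int)+1) = ((s+1 : Nat) : Int) from by push_cast; ring,
            show (((s + 2*k+1 : Nat) : Int) - 1) = (((s+1 : Nat) : Int)) + 2*(k:Int) - 1 from by push_cast; ring]
        rw [ih (s+1) (by omega)]
        have hcond : ((L.drop s).take (k+1) = ((L.drop (s+(k+1))).take (k+1)).reverse) ↔
            ((L.drop (s+1)).take k = ((L.drop (s+1+k)).take k).reverse) := by
          rw [hL, hR, List.reverse_append, show s+1+k = s+(k+1) from by omega]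
          simp [hEq]
        by_cases hc : (L.drop s).take (k+1) = ((L.drop (s+(k+1))).take (k+1)).reverse
        · rw [if_pos hc, if_pos (hcond.mp hc)]; push_cast; ring
        · rw [if_neg hc, if_neg (fun hx => hc (hcond.mpr hx))]
      · rw [if_pos (by simp [hEq])]
        rw [if_neg (fun hcontra => by
          rw [hL, hR, List.reverse_append] at hcontra
          simp at hcontra
          exact hEq hcontra.1)]

lemma suffix_check_eval (L : List String) (s k : Nat) (hn : L.length = s + 2 * k) :
    suffix_check L (L.length : Int) ((s + k : Nat) : Int) =
      decide ((L.drop s).take k = ((L.drop (s + k)).take k).reverse) := by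
  unfold suffix_check
  rw [show (2 * ((s + k : Nat) : Int) - (L.length : Int)) = ((s : Nat) : Int) from by push_cast; omega]
  rw [PySem.List.slice_natCast, PySem.List.slice_from_natCast]
  rw [show s + k - s = k from by omega]
  rw [show L.drop (s + k) = (L.drop (s + k)).take k from
    (List.take_of_length_le (by simp; omega)).symm]
  rw [List.take_take, show min k k = k from by omega]
  simp [Bool.beq_eq_decide_eq]

-- A's first loop = B's first find?
lemma loop1_eq (L : List String) (s : Nat) (hs : s ≤ L.length) :
    find_reflection_loop1 L (s : Int) ((L.length : Int) - 1) =
      (PySem.List.pyRange (((s + L.length + 1) / 2 : Nat) : Int) (L.length : Int) 1).find?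
        (suffix_check L (L.length : Int)) := by
  induction hd : L.length - s generalizing s with
  | zero =>
      rw [find_reflection_loop1, if_neg (by omega)]
      rw [pyRange_one_nil _ _ (by omega), List.find?_nil]
  | succ d ih =>
      by_cases hend : L.length ≤ s + 1
      · rw [find_reflection_loop1, if_neg (by omega)]
        rw [pyRange_one_nil _ _ (by omega), List.find?_nil]
      · rw [find_reflection_loop1, if_pos (by omega)]
        by_cases hp : (s + L.length) % 2 = 0
        · -- even parity: an odd-length window, is_mirror gives 0
          obtain ⟨k, hk⟩ : ∃ k : Nat, L.length = s + 2 * k := ⟨(L.length - s)/2, by omega⟩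
          have hk1 : 1 ≤ k := by omega
          rw [show ((L.length : Int) - 1) = (s : Int) + 2 * (k : Int) - 1 from by
            rw [hk]; push_cast; ring]
          rw [is_mirror_odd L s k (by omega)]
          have hm : ((s + L.length + 1) / 2 : Nat) = s + k := by omega
          rw [hm, PySem.List.pyRange_one_cons (by push_cast; omega), List.find?_cons,
              suffix_check_eval L s k hk]
          by_cases hc : (L.drop s).take k = ((L.drop (s + k)).take k).reverse
          · rw [if_pos hc]
            simp only [hc, decide_true]
            rw [if_pos (by push_cast; omega)]
            push_cast; ring_nf
          · rw [if_neg hc]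
            simp only [hc, decide_false]
            rw [if_neg (by simp)]
            rw [show ((s : Int) + 2 * (k : Int) - 1) = (L.length : Int) - 1 from by
              rw [hk]; push_cast; ring]
            rw [show ((s : Int) + 1) = ((s + 1 : Nat) : Int) from by push_cast; ring]
            rw [ih (s + 1) (by omega) (by omega)]
            rw [show (s + 1 + L.length + 1) / 2 = (s + k) + 1 from by omega]
            norm_cast
        · -- odd parity: even-length window, is_mirror is 0 by parity
          obtain ⟨k, hk⟩ : ∃ k : Nat, L.length - 1 = s + 2 * k := ⟨(L.length - 1 - s)/2, by omega⟩
          rw [show ((L.length : Int) - 1) = (s : Int) + 2 * (k : Nat) from by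
            push_cast; omega]
          rw [is_mirror_even]
          rw [if_neg (by simp)]
          rw [show ((s : Int) + 2 * ((k : Nat) : Int)) = (L.length : Int) - 1 from by push_cast; omega]
          rw [show ((s : Int) + 1) = ((s + 1 : Nat) : Int) from by push_cast; ring]
          rw [ih (s + 1) (by omega) (by omega)]
          congr 3
          omega

lemma prefix_check_eval (L : List String) (k : Nat) :
    prefix_check L ((k : Nat) : Int) =
      decide (L.take k = ((L.drop k).take k).reverse) := by
  unfold prefix_check
  rw [show (2 * ((k : Nat) : Int)) = ((2 * k : Nat) : Int) from by push_cast; ring,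
      PySem.List.slice_to_natCast, PySem.List.slice_natCast,
      show 2 * k - k = k from by omega]
  simp [Bool.beq_eq_decide_eq]

lemma is_mirror_odd0 (L : List String) (k : Nat) (h : 2 * k ≤ L.length) :
    is_mirror L 0 (2 * (k : Int) - 1) =
      if L.take k = ((L.drop k).take k).reverse then (k : Int) else 0 := by
  have h0 := is_mirror_odd L 0 k (by omega)
  norm_num at h0
  exact h0

-- A's second loop = B's second find?
lemma loop2_eq (L : List String) (e : Nat) (he : e < L.length) :
    find_reflection_loop2 L 0 (e : Int) =
      (PySem.List.pyRange ((((e + 1) / 2 : Nat)) : Int) 0 (-1)).find? (prefix_check L) := by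
  induction e with
  | zero =>
      rw [find_reflection_loop2, if_neg (by omega)]
      rw [pyRange_neg_nil _ (by omega), List.find?_nil]
  | succ e ih =>
      rw [find_reflection_loop2, if_pos (by push_cast; omega)]
      by_cases hp : (e + 1) % 2 = 0
      · -- even e+1: even-parity window (odd length), is_mirror gives 0
        obtain ⟨k, hk⟩ : ∃ k : Nat, e + 1 = 2 * k := ⟨(e + 1)/2, by omega⟩
        rw [show (((e + 1 : Nat)) : Int) = (0 : Int) + 2 * (k : Nat) from by push_cast; omega]
        rw [is_mirror_even, if_neg (by simp)]
        rw [show ((0 : Int) + 2 * ((k : Nat) : Int) - 1) = ((e : Nat) : Int) from by push_cast; omega]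
        rw [ih (by omega)]
        congr 3
        omega
      · -- odd e+1: odd-parity window (even length 2k), k = (e+2)/2
        obtain ⟨k, hk⟩ : ∃ k : Nat, e + 2 = 2 * k := ⟨(e + 2)/2, by omega⟩
        have hk1 : 1 ≤ k := by omega
        rw [show (((e + 1 : Nat)) : Int) = 2 * ((k : Nat) : Int) - 1 from by push_cast; omega]
        rw [is_mirror_odd0 L k (by omega)]
        rw [show ((e + 1 + 1) / 2 : Nat) = k from by omega]
        rw [pyRange_neg_cons _ (by push_cast; omega), List.find?_cons,
            prefix_check_eval L k]
        by_cases hc : L.take k = ((L.drop k).take k).reverse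
        · rw [if_pos hc]
          rw [if_pos (show ¬((k : Nat) : Int) = 0 from by push_cast; omega)]
          simp only [hc, decide_true]
        · rw [if_neg hc]
          rw [if_neg (by simp)]
          simp only [hc, decide_false]
          rw [show (2 * ((k : Nat) : Int) - 1 - 1) = ((e : Nat) : Int) from by
            push_cast; omega]
          rw [ih (by omega)]
          rw [show ((e + 1) / 2 : Nat) = k - 1 from by omega]
          rw [show ((k : Nat) : Int) - 1 = (((k - 1 : Nat)) : Int) from by push_cast; omega]


-- ===== VERDICT (by name: the statement is the Claim_ definition above) =====
theorem find_reflection_line_spec : Claim_equal_find_reflection_line := by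
  intro L _
  unfold Spec_find_reflection_line find_reflection_line find_reflection_line_alt
  have h1 : PySem.Int.floordiv ((L.length : Int) + 1) 2 = (((L.length + 1) / 2 : Nat) : Int) := by
    exact_mod_cast PySem.Int.floordiv_natCast (L.length + 1) 2
  have h2 : PySem.Int.floordiv (L.length : Int) 2 = ((L.length / 2 : Nat) : Int) := by
    exact_mod_cast PySem.Int.floordiv_natCast L.length 2
  dsimp only
  rw [h1, h2]
  rcases L with _ | ⟨x, xs⟩
  · simp only [List.length_nil, Nat.cast_zero]
    rw [find_reflection_loop1, if_neg (by norm_num), find_reflection_loop2, if_neg (by norm_num)]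
    rw [pyRange_one_nil _ _ (by norm_num), pyRange_neg_nil _ (by norm_num)]
    simp [List.find?_nil]
  · have hl1 := loop1_eq (x :: xs) 0 (by omega)
    simp only [Nat.cast_zero, Nat.zero_add] at hl1
    have hl2 := loop2_eq (x :: xs) xs.length (by simp)
    rw [show (((x :: xs).length : Int) - 1) = ((xs.length : Nat) : Int) from by simp] at hl1 ⊢
    rw [hl1, hl2]
    rw [show ((xs.length + 1) / 2 : Nat) = ((x :: xs).length / 2 : Nat) from by simp]
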